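-- pv_equiv track=rewrite | github.com/ChangeCapsInRS/MOSAIC-SEN2-CC | sample_eval_v2_categorical.py | ordered_category_rows
-- ===== SOURCE A (Python) =====
-- CATEGORY_ORDER = ["WF", "FL", "WET", "GL", "AG", "GF", "NO", "UR"]
--
-- def ordered_category_rows(rows):
--     row_map = {str(r.get("category", "")): r for r in rows}
--     ordered = []
--     for cat in CATEGORY_ORDER:
--         if cat in row_map:
--             ordered.append(row_map[cat])
--     for cat, row in row_map.items():
--         if cat not in CATEGORY_ORDER:
--             ordered.append(row)
--     return ordered
-- ===== SOURCE B (Python) =====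
-- CATEGORY_ORDER = ["WF", "FL", "WET", "GL", "AG", "GF", "NO", "UR"]
--
-- def ordered_category_rows(rows):
--     order_index = {c: i for i, c in enumerate(CATEGORY_ORDER)}
--     row_map = {str(r.get("category", "")): r for r in rows}
--     buckets = [[] for _ in range(len(CATEGORY_ORDER) + 1)]
--     for cat, row in row_map.items():
--         buckets[order_index.get(cat, len(CATEGORY_ORDER))].append(row)
--     return [row for bucket in buckets for row in bucket]
-- ===== Notes on version B (the rewrite author's own statement) =====
-- stated objective: alternative
-- what changed: Replaces A's two output passes (a scan over CATEGORY_ORDER probing the dict, then a per-item 'not in CATEGORY_ORDER' list scan over the leftovers) with a precomputed rank index and a single bucket-distribution pass over the dedup dict followed by flattening the buckets.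
import Mathlib
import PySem

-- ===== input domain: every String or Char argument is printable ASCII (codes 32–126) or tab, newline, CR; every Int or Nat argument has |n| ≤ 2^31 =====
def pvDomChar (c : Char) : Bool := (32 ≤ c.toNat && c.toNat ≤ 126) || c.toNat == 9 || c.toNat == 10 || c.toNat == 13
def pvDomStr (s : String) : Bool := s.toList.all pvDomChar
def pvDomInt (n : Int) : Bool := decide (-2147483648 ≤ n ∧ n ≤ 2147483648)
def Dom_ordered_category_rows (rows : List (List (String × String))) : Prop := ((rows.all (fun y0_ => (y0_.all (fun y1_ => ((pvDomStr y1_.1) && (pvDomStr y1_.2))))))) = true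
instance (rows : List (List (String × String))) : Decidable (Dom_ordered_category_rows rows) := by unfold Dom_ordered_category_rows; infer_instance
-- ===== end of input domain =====

-- B replaces A's two output passes with one bucket-distribution pass over the dedup dict; return value only (neither side mutates its input).

-- shared context: the module constant, and 'str(r.get("category", ""))' (str of a str is the identity)
def CATEGORY_ORDER : List String := ["WF", "FL", "WET", "GL", "AG", "GF", "NO", "UR"]

def pvRowCat (r : List (String × String)) : String := (PySem.Dict.mk r).getD "category" ""

-- the dict comprehension {str(r.get("category","")): r for r in rows}, shared verbatim by A and B
def pvRowMap (rows : List (List (String × String))) : PySem.Dict String (List (String × String)) :=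
  rows.foldl (fun d r => d.insert (pvRowCat r) r) PySem.Dict.empty

-- ===== PORT A =====
def ordered_category_rows (rows : List (List (String × String))) : List (List (String × String)) :=
  let row_map := pvRowMap rows
  let ordered : List (List (String × String)) :=
    CATEGORY_ORDER.foldl (fun acc cat =>
      if row_map.contains cat then acc ++ [(row_map.get? cat).getD []] else acc) []
  row_map.items.foldl (fun acc p =>
    if p.1 ∈ CATEGORY_ORDER then acc else acc ++ [p.2]) ordered

-- ===== PORT B =====
-- order_index = {c: i for i, c in enumerate(CATEGORY_ORDER)}
def pvOrderIndex : PySem.Dict String Int :=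
  (PySem.List.enumerate CATEGORY_ORDER 0).foldl (fun d p => d.insert p.2 p.1) PySem.Dict.empty

-- buckets[i].append(row): i = order_index.get(cat, 8) is always in 0..8, so the
-- Nat index (toNat) and the in-range get/set are exact for Python's buckets[i]
def ordered_category_rows_alt (rows : List (List (String × String))) : List (List (String × String)) :=
  let row_map := pvRowMap rows
  let buckets : List (List (List (String × String))) :=
    (PySem.List.pyRange 0 (CATEGORY_ORDER.length + 1) 1).map (fun _ => [])
  let buckets := row_map.items.foldl (fun bs p =>
    let i := (pvOrderIndex.getD p.1 (CATEGORY_ORDER.length : Int)).toNat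
    bs.set i (bs.getD i [] ++ [p.2])) buckets
  buckets.flatMap (fun b => b)

-- ===== PRECONDITION & SPEC =====
def Spec_ordered_category_rows (rows : List (List (String × String))) (out : List (List (String × String))) : Prop := out = ordered_category_rows_alt rows
instance (rows : List (List (String × String))) (out : List (List (String × String))) : Decidable (Spec_ordered_category_rows rows out) := by unfold Spec_ordered_category_rows; infer_instance

-- ===== CLAIM (what is proved, stated in full; the proofs are below) =====
def Claim_equal_ordered_category_rows : Prop := ∀ (rows : List (List (String × String))), Dom_ordered_category_rows rows → Spec_ordered_category_rows rows (ordered_category_rows rows)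

-- ===== LEMMAS AND PROOFS =====

-- the bucket index B computes, as a Nat
def nIdx (c : String) : Nat := (pvOrderIndex.getD c (CATEGORY_ORDER.length : Int)).toNat

theorem nIdx_spec (c : String) : nIdx c =
    if c = "WF" then 0 else if c = "FL" then 1 else if c = "WET" then 2 else
    if c = "GL" then 3 else if c = "AG" then 4 else if c = "GF" then 5 else
    if c = "NO" then 6 else if c = "UR" then 7 else 8 := by
  unfold nIdx pvOrderIndex CATEGORY_ORDER
  simp only [PySem.List.enumerate, List.foldl, PySem.Dict.getD_eq_get?_getD,
    PySem.Dict.get?_insert, PySem.Dict.get?_empty]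
  split_ifs <;> simp_all

theorem nIdx_le (c : String) : nIdx c ≤ 8 := by
  rw [nIdx_spec]; split_ifs <;> omega

theorem nIdx_eq_eight_iff (c : String) : nIdx c = 8 ↔ c ∉ CATEGORY_ORDER := by
  rw [nIdx_spec]; unfold CATEGORY_ORDER
  split_ifs <;> simp_all

theorem rowmap_nodup (rows : List (List (String × String))) : (pvRowMap rows).keys.Nodup :=
  PySem.Dict.nodup_keys_foldl_insert_key rows pvRowCat (fun _ r => r) PySem.Dict.empty
    PySem.Dict.nodup_keys_empty

-- a key-unique association list filtered on one key
theorem filter_fst_eq_of_nodup {ν : Type} (k : String) (v : ν) :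
    ∀ (l : List (String × ν)), (l.map Prod.fst).Nodup → (k, v) ∈ l →
      l.filter (fun p => decide (p.1 = k)) = [(k, v)] := by
  intro l
  induction l with
  | nil => simp
  | cons a t ih =>
    intro hnd hm
    simp only [List.map_cons, List.nodup_cons] at hnd
    by_cases hk : a.1 = k
    · have ha : a = (k, v) := by
        rcases List.mem_cons.mp hm with h | h
        · exact h.symm
        · exact absurd (hk ▸ List.mem_map_of_mem h : a.1 ∈ t.map Prod.fst) hnd.1
      have ht : t.filter (fun p => decide (p.1 = k)) = [] := by
        refine List.filter_eq_nil_iff.mpr (fun p hp => ?_)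
        simp only [decide_eq_true_eq]
        intro hpk
        exact hnd.1 (hk ▸ hpk ▸ List.mem_map_of_mem hp)
      simp [ha, ht]
    · have hm' : (k, v) ∈ t := by
        rcases List.mem_cons.mp hm with h | h
        · exact absurd (congrArg Prod.fst h.symm) hk
        · exact h
      simp [hk, ih hnd.2 hm']

theorem filter_fst_eq_nil {ν : Type} (k : String) (l : List (String × ν))
    (h : k ∉ l.map Prod.fst) : l.filter (fun p => decide (p.1 = k)) = [] := by
  refine List.filter_eq_nil_iff.mpr (fun p hp => ?_)
  simp only [decide_eq_true_eq]
  intro hpk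
  exact h (hpk ▸ List.mem_map_of_mem hp)

-- A's probe of the dict at key k, as a filter of the items
theorem chunk_eq (d : PySem.Dict String (List (String × String))) (hnd : d.keys.Nodup)
    (k : String) :
    (if d.contains k then [(d.get? k).getD []] else []) =
      (d.items.filter (fun p => decide (p.1 = k))).map Prod.snd := by
  rw [PySem.Dict.contains_eq_isSome_get?]
  cases h : d.get? k with
  | none =>
    have hk : k ∉ d.items.map Prod.fst := by
      rw [PySem.Dict.get?_eq_none_iff_not_mem_keys] at h
      simpa [PySem.Dict.keys] using h
    simp [filter_fst_eq_nil k d.items hk]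
  | some v =>
    have hm : (k, v) ∈ d.items := PySem.Dict.mem_items_of_get?_eq_some _ h
    have hnd' : (d.items.map Prod.fst).Nodup := by simpa [PySem.Dict.keys] using hnd
    simp [filter_fst_eq_of_nodup k v d.items hnd' hm]

-- two little fold identities for A's append loops
theorem foldl_ext {α β : Type} (f g : β → α → β) (l : List α)
    (h : ∀ acc x, f acc x = g acc x) : ∀ init, l.foldl f init = l.foldl g init := by
  induction l with
  | nil => intro init; rfl
  | cons x t ih => intro init; simp only [List.foldl_cons, h, ih]

theorem foldl_append_opt {α β : Type} (l : List α) (h : α → List β) :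
    ∀ acc : List β, l.foldl (fun acc x => acc ++ h x) acc = acc ++ l.flatMap h := by
  induction l with
  | nil => simp
  | cons x t ih => intro acc; simp [ih, List.append_assoc]

-- A as a flatMap normal form
theorem A_eq (rows : List (List (String × String))) :
    ordered_category_rows rows =
      CATEGORY_ORDER.flatMap (fun c =>
        if (pvRowMap rows).contains c then [((pvRowMap rows).get? c).getD []] else [])
      ++ (pvRowMap rows).items.flatMap (fun p =>
        if p.1 ∈ CATEGORY_ORDER then [] else [p.2]) := by
  unfold ordered_category_rows
  dsimp only
  rw [foldl_ext _ (fun acc cat => acc ++ (if (pvRowMap rows).contains cat then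
        [((pvRowMap rows).get? cat).getD []] else [])) CATEGORY_ORDER
      (by intro acc x; split_ifs <;> simp_all),
      foldl_append_opt,
      foldl_ext _ (fun acc p => acc ++ (if p.1 ∈ CATEGORY_ORDER then [] else [p.2]))
      (pvRowMap rows).items (by intro acc x; split_ifs <;> simp_all),
      foldl_append_opt]
  simp

-- the bucket loop, characterised
theorem bucket_fold (l : List (String × List (String × String)))
    (bs : List (List (List (String × String)))) (hlen : bs.length = 9) :
    l.foldl (fun bs p =>
        bs.set (nIdx p.1) (bs.getD (nIdx p.1) [] ++ [p.2])) bs =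
      (List.range 9).map (fun c =>
        bs.getD c [] ++ (l.filter (fun p => decide (nIdx p.1 = c))).map Prod.snd) := by
  induction l generalizing bs with
  | nil =>
    simp only [List.foldl_nil, List.filter_nil, List.map_nil, List.append_nil]
    refine List.ext_getElem (by simp [hlen]) (fun i h1 h2 => ?_)
    simp only [List.getElem_map, List.getElem_range]
    have hi : i < bs.length := by simp at h2; omega
    rw [List.getD_eq_getElem bs [] hi]
  | cons p t ih =>
    simp only [List.foldl_cons]
    rw [ih _ (by rw [List.length_set]; exact hlen)]
    refine List.map_congr_left (fun c hc => ?_)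
    have hc9 : c < 9 := List.mem_range.mp hc
    have hc' : c < bs.length := by omega
    have hidx : nIdx p.1 < bs.length := by have := nIdx_le p.1; omega
    have hset : (bs.set (nIdx p.1) (bs.getD (nIdx p.1) [] ++ [p.2])).getD c []
        = if nIdx p.1 = c then bs.getD (nIdx p.1) [] ++ [p.2] else bs.getD c [] := by
      rw [List.getD_eq_getElem _ [] (by rw [List.length_set]; exact hc'), List.getElem_set]
      split_ifs with hh
      · rfl
      · rw [List.getD_eq_getElem bs [] hc']
    rw [hset, List.filter_cons]
    by_cases h : nIdx p.1 = c
    · simp [h, List.append_assoc]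
    · simp [h]

-- B as a flatMap normal form
theorem B_eq (rows : List (List (String × String))) :
    ordered_category_rows_alt rows =
      (List.range 9).flatMap (fun c =>
        ((pvRowMap rows).items.filter (fun p => decide (nIdx p.1 = c))).map Prod.snd) := by
  unfold ordered_category_rows_alt
  dsimp only
  have h0 : (PySem.List.pyRange 0 ((CATEGORY_ORDER).length + 1) 1).map
      (fun _ => ([] : List (List (String × String)))) =
      List.replicate 9 [] := by decide
  rw [show (fun (bs : List (List (List (String × String))))
        (p : String × List (String × String)) =>
        bs.set ((pvOrderIndex.getD p.1 (CATEGORY_ORDER.length : Int)).toNat)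
          (bs.getD ((pvOrderIndex.getD p.1 (CATEGORY_ORDER.length : Int)).toNat) [] ++ [p.2]))
      = (fun bs p => bs.set (nIdx p.1) (bs.getD (nIdx p.1) [] ++ [p.2])) from rfl]
  rw [h0, bucket_fold _ _ (by simp)]
  have hrep : ∀ c : Nat,
      (List.replicate 9 ([] : List (List (String × String)))).getD c [] = [] := by
    intro c
    rw [List.getD_eq_getElem?_getD, List.getElem?_replicate]
    split_ifs <;> rfl
  simp only [hrep]
  simp [List.flatMap_map]

theorem range9_flatMap {f : Nat → List (List (String × String))} :
    (List.range 9).flatMap f = (List.range 8).flatMap f ++ f 8 := by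
  simp [List.range_succ]

theorem nIdx_eq_iff_of_lt (c : Nat) (k : String)
    (hk : ∀ s : String, nIdx s = c ↔ s = k) (its : List (String × List (String × String))) :
    its.filter (fun p => decide (nIdx p.1 = c)) = its.filter (fun p => decide (p.1 = k)) :=
  List.filter_congr (fun p _ => by simp [hk])

theorem main_eq (rows : List (List (String × String))) :
    ordered_category_rows rows = ordered_category_rows_alt rows := by
  have hnd := rowmap_nodup rows
  rw [A_eq, B_eq, range9_flatMap]
  congr 1
  · -- ordered categories part
    have hchunk : ∀ k, (if (pvRowMap rows).contains k then
        [((pvRowMap rows).get? k).getD []] else []) =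
        ((pvRowMap rows).items.filter (fun p => decide (p.1 = k))).map Prod.snd :=
      chunk_eq (pvRowMap rows) hnd
    rw [show (List.range 8) = [0,1,2,3,4,5,6,7] by decide]
    simp only [CATEGORY_ORDER, List.flatMap_cons, List.flatMap_nil, List.append_nil]
    rw [hchunk "WF", hchunk "FL", hchunk "WET", hchunk "GL", hchunk "AG", hchunk "GF",
        hchunk "NO", hchunk "UR"]
    rw [nIdx_eq_iff_of_lt 0 "WF" (fun s => by rw [nIdx_spec]; split_ifs <;> simp_all),
        nIdx_eq_iff_of_lt 1 "FL" (fun s => by rw [nIdx_spec]; split_ifs <;> simp_all),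
        nIdx_eq_iff_of_lt 2 "WET" (fun s => by rw [nIdx_spec]; split_ifs <;> simp_all),
        nIdx_eq_iff_of_lt 3 "GL" (fun s => by rw [nIdx_spec]; split_ifs <;> simp_all),
        nIdx_eq_iff_of_lt 4 "AG" (fun s => by rw [nIdx_spec]; split_ifs <;> simp_all),
        nIdx_eq_iff_of_lt 5 "GF" (fun s => by rw [nIdx_spec]; split_ifs <;> simp_all),
        nIdx_eq_iff_of_lt 6 "NO" (fun s => by rw [nIdx_spec]; split_ifs <;> simp_all),
        nIdx_eq_iff_of_lt 7 "UR" (fun s => by rw [nIdx_spec]; split_ifs <;> simp_all)]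
  · -- leftovers part
    rw [show ((pvRowMap rows).items.flatMap (fun p =>
        if p.1 ∈ CATEGORY_ORDER then [] else [p.2]))
      = ((pvRowMap rows).items.filter
          (fun p => decide (nIdx p.1 = 8))).map Prod.snd from ?_]
    induction (pvRowMap rows).items with
    | nil => rfl
    | cons p t ih =>
      by_cases h : p.1 ∈ CATEGORY_ORDER <;>
        simp [ih, h, nIdx_eq_eight_iff, List.flatMap_cons]

-- ===== VERDICT (by name: the statement is the Claim_ definition above) =====
theorem ordered_category_rows_spec : Claim_equal_ordered_category_rows := by
  intro rows _
  unfold Spec_ordered_category_rows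
  exact main_eq rows
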